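-- pv_equiv track=rewrite | github.com/rjavier97/Algo1.2C2023 | python/guia7.py | divideATodos21
-- ===== SOURCE A (Python) =====
-- def divideATodos21(s:[int], e: int)->bool:
--     res: bool = True
--     for num in s :
--         if num % e == 0 :
--             res = res and True
--         else :
--             res = False
--     return res
-- ===== SOURCE B (Python) =====
-- from math import gcd
-- from functools import reduce
--
-- def divideATodos21(s, e: int) -> bool:
--     if not s:
--         return True
--     g = reduce(gcd, s)
--     return g % e == 0
-- ===== Notes on version B (the rewrite author's own statement) =====
-- stated objective: alternative
-- what changed: Instead of testing each element's remainder in a loop, B folds the list into a single gcd and tests e's divisibility of that gcd once (e divides every element iff e divides their gcd).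
import Mathlib
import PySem

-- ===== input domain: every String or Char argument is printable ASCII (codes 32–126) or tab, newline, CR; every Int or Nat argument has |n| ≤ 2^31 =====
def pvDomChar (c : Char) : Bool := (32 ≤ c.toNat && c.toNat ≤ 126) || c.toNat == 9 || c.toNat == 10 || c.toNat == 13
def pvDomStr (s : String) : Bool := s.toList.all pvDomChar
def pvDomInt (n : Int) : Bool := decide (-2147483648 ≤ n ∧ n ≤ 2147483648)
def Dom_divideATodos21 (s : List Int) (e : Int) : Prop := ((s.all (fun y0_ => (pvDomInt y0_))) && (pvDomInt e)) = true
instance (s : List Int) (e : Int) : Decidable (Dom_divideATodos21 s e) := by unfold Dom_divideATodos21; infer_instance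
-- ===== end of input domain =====

-- B replaces the per-element remainder loop by a single gcd fold and one divisibility test (alternative decomposition).


-- ===== PORT A =====
def divideATodos21 (s : List Int) (e : Int) : Bool :=
  s.foldl (fun res num => if PySem.Int.mod num e == 0 then res && true else false) true

-- ===== PORT B =====
def divideATodos21_alt (s : List Int) (e : Int) : Bool :=
  match s with
  | [] => true
  | h :: t => PySem.Int.mod (t.foldl (fun g num => (Int.gcd g num : Int)) h) e == 0

-- ===== PRECONDITION & SPEC =====
-- Pre_ excludes exactly e = 0 with non-empty s, where Python A raises ZeroDivisionError.
def Pre_divideATodos21 (s : List Int) (e : Int) : Prop := s = [] ∨ e ≠ 0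
instance (s : List Int) (e : Int) : Decidable (Pre_divideATodos21 s e) := by unfold Pre_divideATodos21; infer_instance
def pvWitness_divideATodos21 : List Int × Int := ([6, 9], 3)

def Spec_divideATodos21 (s : List Int) (e : Int) (out : Bool) : Prop := out = divideATodos21_alt s e
instance (s : List Int) (e : Int) (out : Bool) : Decidable (Spec_divideATodos21 s e out) := by unfold Spec_divideATodos21; infer_instance

-- ===== CLAIM (what is proved, stated in full; the proofs are below) =====
def Claim_equal_divideATodos21 : Prop := ∀ (s : List Int) (e : Int), Dom_divideATodos21 s e → Pre_divideATodos21 s e → Spec_divideATodos21 s e (divideATodos21 s e)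

-- ===== LEMMAS AND PROOFS =====

theorem foldA_eq (e : Int) (s : List Int) (r : Bool) :
    s.foldl (fun res num => if PySem.Int.mod num e == 0 then res && true else false) r
      = (r && s.all (fun num => PySem.Int.mod num e == 0)) := by
  induction s generalizing r with
  | nil => simp
  | cons h t ih =>
    simp only [List.foldl_cons, List.all_cons, ih]
    by_cases hm : (PySem.Int.mod h e == 0) = true <;> simp [hm]

theorem dvd_igcd_iff (e h a : Int) : e ∣ (Int.gcd h a : Int) ↔ e ∣ h ∧ e ∣ a := by
  rw [← Int.natAbs_dvd, Int.natCast_dvd_natCast, Int.gcd, Nat.dvd_gcd_iff,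
    Int.natAbs_dvd_natAbs, Int.natAbs_dvd_natAbs]

theorem dvd_gcd_fold (e h : Int) (t : List Int) :
    e ∣ t.foldl (fun g num => (Int.gcd g num : Int)) h ↔ (e ∣ h ∧ ∀ x ∈ t, e ∣ x) := by
  induction t generalizing h with
  | nil => simp
  | cons a t ih =>
    simp only [List.foldl_cons, ih, dvd_igcd_iff, List.mem_cons]
    constructor
    · rintro ⟨⟨h1, h2⟩, hall⟩
      exact ⟨h1, fun x hx => hx.elim (fun hxa => hxa ▸ h2) (hall x)⟩
    · rintro ⟨h1, hall⟩
      exact ⟨⟨h1, hall a (Or.inl rfl)⟩, fun x hx => hall x (Or.inr hx)⟩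

-- ===== VERDICT (by name: the statement is the Claim_ definition above) =====
theorem divideATodos21_spec : Claim_equal_divideATodos21 := by
  intro s e _ _
  unfold Spec_divideATodos21 divideATodos21 divideATodos21_alt
  cases s with
  | nil => simp
  | cons h t =>
    rw [foldA_eq]
    have key : ∀ a b : Bool, (a = true ↔ b = true) → a = b := by decide
    apply key
    simp only [Bool.true_and, List.all_eq_true, beq_iff_eq,
      PySem.Int.mod_eq_zero_iff_dvd, dvd_gcd_fold, List.mem_cons]
    constructor
    · intro hall
      exact ⟨hall h (Or.inl rfl), fun x hx => hall x (Or.inr hx)⟩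
    · rintro ⟨h1, hall⟩ x hx
      exact hx.elim (fun hxh => hxh ▸ h1) (hall x)
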